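-- pv_equiv track=rewrite | github.com/kotk682/Auto_media | app/main.py | _is_reserved_frontend_path
-- ===== SOURCE A (Python) =====
-- FRONTEND_RESERVED_PREFIXES = (
--     "api",
--     "media",
--     "health",
--     "docs",
--     "redoc",
--     "openapi.json",
-- )
--
-- def _is_reserved_frontend_path(full_path: str) -> bool:
--     normalized = str(full_path or "").strip().lstrip("/")
--     if not normalized:
--         return False
--     return any(
--         normalized == prefix or normalized.startswith(f"{prefix}/")
--         for prefix in FRONTEND_RESERVED_PREFIXES
--     )
-- ===== SOURCE B (Python) =====
-- FRONTEND_RESERVED_PREFIXES = (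
--     "api",
--     "media",
--     "health",
--     "docs",
--     "redoc",
--     "openapi.json",
-- )
--
-- _RESERVED = frozenset(FRONTEND_RESERVED_PREFIXES)
--
--
-- def _is_reserved_frontend_path(full_path: str) -> bool:
--     # Single index-based scan: trim whitespace with two pointers, skip leading
--     # slashes, cut out the first path segment, and look it up in a frozenset.
--     s = str(full_path or "")
--     i, j = 0, len(s)
--     while i < j and s[i].isspace():
--         i += 1
--     while i < j and s[j - 1].isspace():
--         j -= 1
--     while i < j and s[i] == "/":
--         i += 1
--     if i == j:
--         return False
--     k = i
--     while k < j and s[k] != "/":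
--         k += 1
--     return s[i:k] in _RESERVED
-- ===== Notes on version B (the rewrite author's own statement) =====
-- stated objective: alternative
-- what changed: Replaces A's string-method normalization (strip/lstrip) plus linear any-scan comparing against each of the six reserved prefixes by a single index-based two-pointer scan that trims whitespace and leading slashes, cuts out the first path segment by index, and looks it up in a precomputed frozenset.
import Mathlib
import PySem

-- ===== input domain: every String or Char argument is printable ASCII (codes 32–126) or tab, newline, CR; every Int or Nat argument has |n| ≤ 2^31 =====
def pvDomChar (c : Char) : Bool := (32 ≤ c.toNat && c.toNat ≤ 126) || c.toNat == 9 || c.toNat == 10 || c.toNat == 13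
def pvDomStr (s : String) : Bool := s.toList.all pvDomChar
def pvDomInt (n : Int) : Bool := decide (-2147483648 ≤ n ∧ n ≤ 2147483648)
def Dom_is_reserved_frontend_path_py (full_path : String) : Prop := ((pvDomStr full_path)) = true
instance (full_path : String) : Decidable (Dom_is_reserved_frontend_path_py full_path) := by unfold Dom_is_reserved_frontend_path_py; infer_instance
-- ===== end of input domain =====

-- B replaces A's string-method normalization plus linear scan over six prefixes by a single
-- index-based pointer scan that trims, cuts out the first path segment and looks it up in a set
-- (alternative decomposition; same cost).

-- ===== PORT A =====
-- FRONTEND_RESERVED_PREFIXES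
def pvPrefixesA : List (List Char) :=
  ["api".toList, "media".toList, "health".toList, "docs".toList, "redoc".toList, "openapi.json".toList]

def is_reserved_frontend_path_py (full_path : String) : Bool :=
  -- str(full_path or "").strip() == strip(full_path) ('or ""' is identity on strings here);
  -- .lstrip("/") is exactly dropWhile (· == '/') on the characters.
  let normalized := (PySem.Str.strip full_path).toList.dropWhile (fun c => c == '/')
  if normalized.isEmpty then false
  else pvPrefixesA.any (fun p => normalized == p || PySem.Chars.startswith normalized (p ++ ['/']))

-- ===== PORT B =====
-- _RESERVED = frozenset(FRONTEND_RESERVED_PREFIXES)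
def pvReservedSet : PySem.Set (List Char) :=
  PySem.Set.ofList ["api".toList, "media".toList, "health".toList, "docs".toList, "redoc".toList, "openapi.json".toList]

-- Source B's 'while i < j and <test on s[i]>: i += 1' loops, one generic definition per direction.
-- s[i] is always in range when the loop guard holds (i < j ≤ len s); the getD default is never read.
def pvScan (P : Char → Bool) (s : List Char) (j i : Nat) : Nat :=
  if i < j ∧ P (s[i]?.getD ' ') then pvScan P s j (i + 1) else i
termination_by j - i
decreasing_by omega

-- 'while i < j and s[j-1].isspace(): j -= 1'
def pvTrim (s : List Char) (i j : Nat) : Nat :=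
  if i < j ∧ PySem.Chars.isspace (s[j - 1]?.getD ' ') then pvTrim s i (j - 1) else j
termination_by j - i
decreasing_by omega

def is_reserved_frontend_path_py_alt (full_path : String) : Bool :=
  let s := full_path.toList
  let i0 := pvScan PySem.Chars.isspace s s.length 0            -- skip leading whitespace
  let j := pvTrim s i0 s.length                                -- drop trailing whitespace
  let i := pvScan (fun c => c == '/') s j i0                   -- skip leading slashes
  if i == j then false
  else
    let k := pvScan (fun c => c != '/') s j i                  -- end of the first segment
    pvReservedSet.contains ((s.take k).drop i)                 -- s[i:k] (0 ≤ i ≤ k ≤ len s here)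

-- ===== PRECONDITION & SPEC =====
def Spec_is_reserved_frontend_path_py (full_path : String) (out : Bool) : Prop := out = is_reserved_frontend_path_py_alt full_path
instance (full_path : String) (out : Bool) : Decidable (Spec_is_reserved_frontend_path_py full_path out) := by unfold Spec_is_reserved_frontend_path_py; infer_instance

-- ===== CLAIM =====
def Claim_equal_is_reserved_frontend_path_py : Prop := ∀ (full_path : String), Dom_is_reserved_frontend_path_py full_path → Spec_is_reserved_frontend_path_py full_path (is_reserved_frontend_path_py full_path)

-- ===== LEMMAS AND PROOFS =====

theorem pv_dropWhile_eq_drop (P : Char → Bool) (l : List Char) :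
    l.dropWhile P = l.drop (l.takeWhile P).length := by
  induction l with
  | nil => rfl
  | cons a l ih =>
    by_cases h : P a <;> simp [List.dropWhile_cons, List.takeWhile_cons, h, ih]

theorem pv_takeWhile_eq_take (P : Char → Bool) (l : List Char) :
    l.takeWhile P = l.take (l.takeWhile P).length := by
  induction l with
  | nil => rfl
  | cons a l ih =>
    by_cases h : P a <;> simp [List.takeWhile_cons, h]
    exact ih

theorem pv_reverse_drop (l : List Char) (n : Nat) :
    l.reverse.drop n = (l.take (l.length - n)).reverse := by
  rw [List.drop_reverse]

-- the forward scan loop counts the P-prefix of s[i:j]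
theorem pvScan_eq (P : Char → Bool) (s : List Char) :
    ∀ (d i j : Nat), j - i = d → i ≤ j → j ≤ s.length →
      pvScan P s j i = i + (((s.take j).drop i).takeWhile P).length := by
  intro d
  induction d with
  | zero =>
    intro i j hd hij hj
    have hji : i = j := by omega
    subst hji
    rw [pvScan]
    have h1 : (s.take i).drop i = [] := by
      apply List.drop_eq_nil_of_le
      simp [List.length_take]
    simp [h1]
  | succ d ih =>
    intro i j hd hij hj
    have hi : i < j := by omega
    have hil : i < s.length := by omega
    have hit : i < (s.take j).length := by simp [List.length_take]; omega
    have hspot : s[i]?.getD ' ' = s[i] := by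
      rw [List.getElem?_eq_getElem hil]; rfl
    have hcons : (s.take j).drop i = s[i] :: (s.take j).drop (i + 1) := by
      rw [List.drop_eq_getElem_cons hit, List.getElem_take]
    rw [pvScan, hspot]
    by_cases hp : P s[i]
    · rw [if_pos ⟨hi, hp⟩, ih (i + 1) j (by omega) (by omega) hj, hcons,
        List.takeWhile_cons, if_pos hp]
      simp; omega
    · rw [if_neg (by tauto), hcons, List.takeWhile_cons, if_neg hp]
      simp

-- the backward trim loop counts the whitespace suffix of s[i:j]
theorem pvTrim_eq (s : List Char) :
    ∀ (d i j : Nat), j - i = d → i ≤ j → j ≤ s.length →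
      pvTrim s i j = j - (((s.take j).drop i).reverse.takeWhile PySem.Chars.isspace).length := by
  intro d
  induction d with
  | zero =>
    intro i j hd hij hj
    have hji : i = j := by omega
    subst hji
    rw [pvTrim]
    have h1 : (s.take i).drop i = [] := by
      apply List.drop_eq_nil_of_le
      simp [List.length_take]
    simp [h1]
  | succ d ih =>
    intro i j hd hij hj
    obtain ⟨m, rfl⟩ : ∃ m, j = m + 1 := ⟨j - 1, by omega⟩
    have hi : i < m + 1 := by omega
    have hml : m < s.length := by omega
    have hspot : s[m + 1 - 1]?.getD ' ' = s[m] := by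
      simp only [Nat.add_sub_cancel]
      rw [List.getElem?_eq_getElem hml]; rfl
    have htake : s.take (m + 1) = s.take m ++ [s[m]] := by
      rw [List.take_succ, List.getElem?_eq_getElem hml]; rfl
    have hdrop : (s.take (m + 1)).drop i = (s.take m).drop i ++ [s[m]] := by
      rw [htake, List.drop_append_of_le_length (by simp [List.length_take]; omega)]
    have hrev : ((s.take (m + 1)).drop i).reverse = s[m] :: ((s.take m).drop i).reverse := by
      rw [hdrop]; simp
    rw [pvTrim, hspot]
    by_cases hp : PySem.Chars.isspace s[m]
    · rw [if_pos ⟨hi, hp⟩]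
      simp only [Nat.add_sub_cancel]
      rw [ih i m (by omega) (by omega) (by omega), hrev, List.takeWhile_cons, if_pos hp]
      have hlen : (((s.take m).drop i).reverse.takeWhile PySem.Chars.isspace).length
          ≤ m - i := by
        calc _ ≤ ((s.take m).drop i).reverse.length := (List.takeWhile_sublist _).length_le
        _ ≤ _ := by simp [List.length_take]; omega
      simp only [List.length_cons]
      omega
    · rw [if_neg (by tauto), hrev, List.takeWhile_cons, if_neg hp]
      simp

-- For a prefix p without '/', "cs == p or cs startswith p+'/'" is "first segment of cs == p".
theorem pv_seg_lemma (cs p : List Char) (hp : '/' ∉ p) :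
    (cs == p || PySem.Chars.startswith cs (p ++ ['/'])) = (cs.takeWhile (fun c => c != '/') == p) := by
  induction p generalizing cs with
  | nil =>
    cases cs with
    | nil => decide
    | cons c cs' =>
      rw [Bool.eq_iff_iff]
      by_cases hc : c = '/'
      · subst hc
        simp [PySem.Chars.startswith_iff, List.cons_prefix_cons]
      · simp [PySem.Chars.startswith_iff, hc, Ne.symm hc, List.cons_prefix_cons]
  | cons a p' ih =>
    have ha : a ≠ '/' := by intro h; exact hp (h ▸ List.mem_cons_self ..)
    have hp' : '/' ∉ p' := fun h => hp (List.mem_cons_of_mem _ h)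
    cases cs with
    | nil =>
      rw [Bool.eq_iff_iff]
      simp [PySem.Chars.startswith_iff]
    | cons c cs' =>
      have hrec := ih cs' hp'
      rw [Bool.eq_iff_iff] at hrec
      simp only [Bool.or_eq_true, beq_iff_eq, PySem.Chars.startswith_iff] at hrec
      rw [Bool.eq_iff_iff]
      by_cases hc : c = '/'
      · subst hc
        simp [PySem.Chars.startswith_iff, List.cons_prefix_cons, ha, Ne.symm ha]
      · simp only [Bool.or_eq_true, beq_iff_eq, PySem.Chars.startswith_iff,
          List.cons_append, List.cons_prefix_cons, List.takeWhile_cons, List.cons.injEq]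
        simp only [show (c != '/') = true by simp [hc], if_true, List.cons.injEq]
        constructor
        · rintro (⟨h1, h2⟩ | ⟨h1, h2⟩)
          · exact ⟨h1, hrec.mp (Or.inl h2)⟩
          · exact ⟨h1.symm, hrec.mp (Or.inr h2)⟩
        · rintro ⟨h1, h2⟩
          rcases hrec.mpr h2 with h3 | h3
          · exact Or.inl ⟨h1, h3⟩
          · exact Or.inr ⟨h1.symm, h3⟩

-- The scan over a '/-free' prefix list, rewritten segment-wise.
theorem pv_any_seg (cs : List Char) (ps : List (List Char)) (h : ∀ p ∈ ps, '/' ∉ p) :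
    (ps.any fun p => cs == p || PySem.Chars.startswith cs (p ++ ['/'])) =
    (ps.any fun p => cs.takeWhile (fun c => c != '/') == p) := by
  induction ps with
  | nil => rfl
  | cons q qs ih =>
    simp only [List.any_cons, pv_seg_lemma cs q (h q (List.mem_cons_self ..)),
      ih (fun p hp => h p (List.mem_cons_of_mem _ hp))]

-- ===== VERDICT =====
set_option maxHeartbeats 1000000 in
theorem is_reserved_frontend_path_py_spec : Claim_equal_is_reserved_frontend_path_py := by
  intro full_path _
  unfold Spec_is_reserved_frontend_path_py is_reserved_frontend_path_py is_reserved_frontend_path_py_alt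
  set t := full_path.toList with ht
  -- i0: end of the leading-whitespace run
  have hi0 : pvScan PySem.Chars.isspace t t.length 0
      = (t.takeWhile PySem.Chars.isspace).length := by
    rw [pvScan_eq _ _ (t.length - 0) 0 t.length rfl (Nat.zero_le _) le_rfl]
    simp [List.take_length]
  set i0 := pvScan PySem.Chars.isspace t t.length 0 with hi0d
  have hdrop0 : t.drop i0 = PySem.Chars.lstrip t := by
    rw [hi0, PySem.Chars.lstrip, pv_dropWhile_eq_drop]
  have hi0le : i0 ≤ t.length := by
    rw [hi0]; exact (List.takeWhile_sublist _).length_le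
  -- j: end of the trimmed region
  set r := ((t.drop i0).reverse.takeWhile PySem.Chars.isspace).length with hr
  have hrle : r ≤ t.length - i0 := by
    calc r ≤ (t.drop i0).reverse.length := (List.takeWhile_sublist _).length_le
    _ = t.length - i0 := by simp
  have hj : pvTrim t i0 t.length = t.length - r := by
    rw [pvTrim_eq t (t.length - i0) i0 t.length rfl hi0le le_rfl]
    simp [List.take_length, hr]
  set j := pvTrim t i0 t.length with hjd
  have hi0j : i0 ≤ j := by omega
  have hjle : j ≤ t.length := by omega
  -- the stripped string is s[i0:j]
  have hstrip : PySem.Chars.strip t = (t.take j).drop i0 := by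
    rw [PySem.Chars.strip, ← hdrop0, PySem.Chars.rstrip, pv_dropWhile_eq_drop, ← hr,
      pv_reverse_drop, List.reverse_reverse, List.drop_take]
    congr 1
    simp only [List.length_reverse, List.length_drop]
    omega
  -- i: past the leading slashes
  have hi1 : pvScan (fun c => c == '/') t j i0
      = i0 + (((t.take j).drop i0).takeWhile (fun c => c == '/')).length := by
    exact pvScan_eq _ _ (j - i0) i0 j rfl hi0j hjle
  set i := pvScan (fun c => c == '/') t j i0 with hid
  -- n: A's normalized string, as a slice
  have hn : (PySem.Chars.strip t).dropWhile (fun c => c == '/') = (t.take j).drop i := by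
    rw [hstrip, pv_dropWhile_eq_drop, hi1, List.drop_drop]
  set n := (PySem.Chars.strip t).dropWhile (fun c => c == '/') with hnd
  have hij : i ≤ j := by
    rw [hi1]
    have := (List.takeWhile_sublist (l := (t.take j).drop i0) (fun c => c == '/')).length_le
    simp [List.length_take, List.length_drop] at this
    omega
  have hnlen : n.length = j - i := by
    rw [hn]; simp [List.length_take, List.length_drop]; omega
  -- k: end of the first segment
  have hk : pvScan (fun c => c != '/') t j i = i + (n.takeWhile (fun c => c != '/')).length := by
    rw [pvScan_eq _ _ (j - i) i j rfl hij hjle, hn]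
  set k := pvScan (fun c => c != '/') t j i with hkd
  have hkj : k ≤ j := by
    rw [hk]
    have := (List.takeWhile_sublist (l := n) (fun c => c != '/')).length_le
    omega
  -- the slice s[i:k] is the first segment of n
  have hseg : (t.take k).drop i = n.takeWhile (fun c => c != '/') := by
    have h1 : t.take k = (t.take j).take k := by
      rw [List.take_take, Nat.min_eq_left hkj]
    rw [h1, List.drop_take, ← hn, hk, Nat.add_sub_cancel_left, ← pv_takeWhile_eq_take]
  -- assemble
  simp only [PySem.Str.toList_strip, ← ht, ← hnd, ← hi0d, ← hjd, ← hid, ← hkd]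
  by_cases hz : i = j
  · have hne : n = [] := List.eq_nil_of_length_eq_zero (by omega)
    simp [hne, hz]
  · have hnne : n ≠ [] := by
      intro h
      rw [h] at hnlen
      simp at hnlen
      omega
    rw [if_neg (by simp [List.isEmpty_iff, hnne]), if_neg (by simp [hz])]
    rw [pv_any_seg n pvPrefixesA (by decide), hseg, Bool.eq_iff_iff]
    simp only [pvPrefixesA, pvReservedSet, PySem.Set.contains_iff, PySem.Set.mem_ofList,
      List.any_eq_true, List.mem_cons, List.not_mem_nil, or_false, beq_iff_eq]
    constructor
    · rintro ⟨p, hmem, hq⟩; subst hq; tauto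
    · intro hmem; exact ⟨_, hmem, rfl⟩
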